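-- pv_equiv track=rewrite | github.com/Lim3nius/aoc | 2024/08/main.py | antinodes_from
-- ===== SOURCE A (Python) =====
-- from itertools import combinations, count
--
-- def antinodes_from(node: tuple[int, int], rows, cols, vec: tuple[int, int], infinite: bool) -> list[tuple[int, int]]:
--     antinodes = []
--
--     for i in count(1):
--         nnode = (node[0] + i * vec[0], node[1] + i * vec[1])
--         if not within_bounds(nnode, rows, cols):
--             break
--         else:
--             antinodes.append(nnode)
--
--         if not infinite:
--             break
--
--     return antinodes
--
-- def within_bounds(node: tuple[int, int], rows: int, cols: int) -> bool:
--     return 0 <= node[0] < rows and 0 <= node[1] < cols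
-- ===== SOURCE B (Python) =====
-- def antinodes_from(node, rows, cols, vec, infinite):
--     first = (node[0] + vec[0], node[1] + vec[1])
--     if not (0 <= first[0] < rows and 0 <= first[1] < cols):
--         return []
--     if not infinite:
--         return [first]
--     his = [h for h in (_hi_axis(node[0], vec[0], rows),
--                        _hi_axis(node[1], vec[1], cols)) if h is not None]
--     hi = min(his)
--     return [(node[0] + i * vec[0], node[1] + i * vec[1]) for i in range(1, hi + 1)]
--
--
-- def _hi_axis(p, v, bound):
--     # largest i with 0 <= p + i*v < bound, given i=1 already satisfies this axis
--     if v > 0: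
--         return (bound - 1 - p) // v
--     if v < 0:
--         return p // (-v)
--     return None
-- ===== Notes on version B (the rewrite author's own statement) =====
-- stated objective: alternative
-- what changed: Replaced A's step-and-test loop (iterate i=1,2,... until out of bounds) by a closed-form per-axis maximum step count via floor division, intersected across axes, then a single range comprehension emitting the points.
import Mathlib
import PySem

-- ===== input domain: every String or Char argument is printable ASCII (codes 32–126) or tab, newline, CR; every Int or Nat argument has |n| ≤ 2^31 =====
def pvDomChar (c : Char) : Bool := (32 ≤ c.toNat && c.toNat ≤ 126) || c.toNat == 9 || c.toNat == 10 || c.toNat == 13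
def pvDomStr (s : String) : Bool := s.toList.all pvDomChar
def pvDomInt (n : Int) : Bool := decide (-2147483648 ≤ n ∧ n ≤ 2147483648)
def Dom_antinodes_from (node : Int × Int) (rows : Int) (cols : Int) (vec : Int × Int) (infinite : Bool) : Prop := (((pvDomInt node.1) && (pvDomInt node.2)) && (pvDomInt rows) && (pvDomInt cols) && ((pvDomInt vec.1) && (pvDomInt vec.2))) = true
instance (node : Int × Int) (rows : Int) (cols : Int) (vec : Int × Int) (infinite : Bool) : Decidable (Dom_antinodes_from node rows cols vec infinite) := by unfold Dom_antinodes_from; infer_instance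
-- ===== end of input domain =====

-- B replaces A's step-until-out-of-bounds loop by a closed-form per-axis step bound
-- (floor divisions) intersected across axes, then emits the points in one range map (objective: alternative).

-- ===== PORT A =====
def within_bounds (node : Int × Int) (rows : Int) (cols : Int) : Bool :=
  decide (0 ≤ node.1 ∧ node.1 < rows ∧ 0 ≤ node.2 ∧ node.2 < cols)

-- A's `for i in count(1)` loop; `fuel` only makes the recursion total (inside
-- Pre_ the loop provably exits long before the fuel chosen below runs out).
def antinodesLoop (node : Int × Int) (rows : Int) (cols : Int) (vec : Int × Int)
    (infinite : Bool) (i : Int) (acc : List (Int × Int)) : Nat → List (Int × Int)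
  | 0 => acc.reverse
  | fuel + 1 =>
    let nnode := (node.1 + i * vec.1, node.2 + i * vec.2)
    if within_bounds nnode rows cols = false then acc.reverse
    else if infinite = false then (nnode :: acc).reverse
    else antinodesLoop node rows cols vec infinite (i + 1) (nnode :: acc) fuel

def antinodes_from (node : Int × Int) (rows : Int) (cols : Int) (vec : Int × Int) (infinite : Bool) : List (Int × Int) :=
  antinodesLoop node rows cols vec infinite 1 [] (rows.toNat + cols.toNat + 2)

-- ===== PORT B =====
def hiAxis (p : Int) (v : Int) (bound : Int) : Option Int :=
  if 0 < v then some (PySem.Int.floordiv (bound - 1 - p) v)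
  else if v < 0 then some (PySem.Int.floordiv p (-v))
  else none

def antinodes_from_alt (node : Int × Int) (rows : Int) (cols : Int) (vec : Int × Int) (infinite : Bool) : List (Int × Int) :=
  let first := (node.1 + vec.1, node.2 + vec.2)
  if ¬ (0 ≤ first.1 ∧ first.1 < rows ∧ 0 ≤ first.2 ∧ first.2 < cols) then []
  else if infinite = false then [first]
  else
    let his := ([hiAxis node.1 vec.1 rows, hiAxis node.2 vec.2 cols]).filterMap id
    -- Python's `min` raises on an empty `his`; that happens only outside Pre_ (getD 0 is arbitrary there)
    let hi := (PySem.List.min? his (fun x => x)).getD 0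
    (PySem.List.pyRange 1 (hi + 1) 1).map (fun i => (node.1 + i * vec.1, node.2 + i * vec.2))

-- ===== PRECONDITION & SPEC =====
-- Pre_ excludes exactly the inputs where A never terminates: infinite=True with
-- vec=(0,0) and node itself in bounds (the loop re-appends node forever).
def Pre_antinodes_from (node : Int × Int) (rows : Int) (cols : Int) (vec : Int × Int) (infinite : Bool) : Prop :=
  ¬ (infinite = true ∧ vec.1 = 0 ∧ vec.2 = 0 ∧
     0 ≤ node.1 ∧ node.1 < rows ∧ 0 ≤ node.2 ∧ node.2 < cols)

instance (node : Int × Int) (rows : Int) (cols : Int) (vec : Int × Int) (infinite : Bool) : Decidable (Pre_antinodes_from node rows cols vec infinite) := by unfold Pre_antinodes_from; infer_instance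

def pvWitness_antinodes_from : (Int × Int) × Int × Int × (Int × Int) × Bool := ((0, 0), 3, 4, (1, 1), true)

def Spec_antinodes_from (node : Int × Int) (rows : Int) (cols : Int) (vec : Int × Int) (infinite : Bool) (out : List (Int × Int)) : Prop := out = antinodes_from_alt node rows cols vec infinite
instance (node : Int × Int) (rows : Int) (cols : Int) (vec : Int × Int) (infinite : Bool) (out : List (Int × Int)) : Decidable (Spec_antinodes_from node rows cols vec infinite out) := by unfold Spec_antinodes_from; infer_instance

-- ===== CLAIM (what is proved, stated in full; the proofs are below) =====
def Claim_equal_antinodes_from : Prop := ∀ (node : Int × Int) (rows : Int) (cols : Int) (vec : Int × Int) (infinite : Bool), Dom_antinodes_from node rows cols vec infinite → Pre_antinodes_from node rows cols vec infinite → Spec_antinodes_from node rows cols vec infinite (antinodes_from node rows cols vec infinite)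

-- ===== LEMMAS AND PROOFS =====

-- per-axis facts about the closed-form bound
lemma axis_valid (p v bound j h : Int) (h0 : 0 ≤ p + v) (hb : p + v < bound)
    (hh : hiAxis p v bound = some h) (hj1 : 1 ≤ j) (hj2 : j ≤ h) :
    0 ≤ p + j * v ∧ p + j * v < bound := by
  by_cases hpos : 0 < v
  · simp only [hiAxis, if_pos hpos, Option.some.injEq] at hh
    subst hh
    rw [PySem.Int.le_floordiv_iff_mul_le hpos] at hj2
    have hm : v ≤ j * v := le_mul_of_one_le_left (le_of_lt hpos) hj1
    constructor <;> linarith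
  · by_cases hneg : v < 0
    · simp only [hiAxis, if_neg hpos, if_pos hneg, Option.some.injEq] at hh
      subst hh
      have hv' : 0 < -v := by linarith
      rw [PySem.Int.le_floordiv_iff_mul_le hv'] at hj2
      have hm : j * v ≤ 1 * v := mul_le_mul_of_nonpos_right hj1 (le_of_lt hneg)
      have : j * -v = -(j * v) := by ring
      constructor <;> linarith [hj2, this ▸ hj2]
    · simp [hiAxis, hpos, hneg] at hh

lemma axis_stop (p v bound j h : Int)
    (hh : hiAxis p v bound = some h) (hj : h < j) :
    ¬ (0 ≤ p + j * v ∧ p + j * v < bound) := by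
  by_cases hpos : 0 < v
  · simp only [hiAxis, if_pos hpos, Option.some.injEq] at hh
    subst hh
    rw [PySem.Int.floordiv_lt_iff_lt_mul hpos] at hj
    rintro ⟨-, h2⟩; linarith
  · by_cases hneg : v < 0
    · simp only [hiAxis, if_neg hpos, if_pos hneg, Option.some.injEq] at hh
      subst hh
      have hv' : 0 < -v := by linarith
      rw [PySem.Int.floordiv_lt_iff_lt_mul hv'] at hj
      have : j * -v = -(j * v) := by ring
      rintro ⟨h1, -⟩; rw [this] at hj; linarith
    · simp [hiAxis, hpos, hneg] at hh

lemma axis_one_le (p v bound h : Int) (h0 : 0 ≤ p + v) (hb : p + v < bound)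
    (hh : hiAxis p v bound = some h) : 1 ≤ h := by
  by_cases hpos : 0 < v
  · simp only [hiAxis, if_pos hpos, Option.some.injEq] at hh
    subst hh
    rw [PySem.Int.le_floordiv_iff_mul_le hpos]; linarith
  · by_cases hneg : v < 0
    · simp only [hiAxis, if_neg hpos, if_pos hneg, Option.some.injEq] at hh
      subst hh
      have hv' : 0 < -v := by linarith
      rw [PySem.Int.le_floordiv_iff_mul_le hv']; linarith
    · simp [hiAxis, hpos, hneg] at hh

lemma axis_le_bound (p v bound h : Int) (h0 : 0 ≤ p + v) (hb : p + v < bound)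
    (hh : hiAxis p v bound = some h) : h ≤ bound := by
  have hbound : 1 ≤ bound := by linarith
  by_cases hpos : 0 < v
  · simp only [hiAxis, if_pos hpos, Option.some.injEq] at hh
    subst hh
    have : PySem.Int.floordiv (bound - 1 - p) v < bound + 1 := by
      rw [PySem.Int.floordiv_lt_iff_lt_mul hpos]
      have h1 : bound ≤ bound * v := le_mul_of_one_le_right (by linarith) hpos
      nlinarith
    linarith
  · by_cases hneg : v < 0
    · simp only [hiAxis, if_neg hpos, if_pos hneg, Option.some.injEq] at hh
      subst hh
      have hv' : 0 < -v := by linarith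
      have : PySem.Int.floordiv p (-v) < bound + 1 := by
        rw [PySem.Int.floordiv_lt_iff_lt_mul hv']
        have h1 : bound ≤ bound * -v := le_mul_of_one_le_right (by linarith) hv'
        nlinarith
      linarith
    · simp [hiAxis, hpos, hneg] at hh

-- A's loop, run with enough fuel, produces exactly the points at steps 1..hi
lemma loop_run (node : Int × Int) (rows cols : Int) (vec : Int × Int) (hi : Int)
    (hP : ∀ j, 1 ≤ j → j ≤ hi →
      within_bounds (node.1 + j * vec.1, node.2 + j * vec.2) rows cols = true)
    (hS : within_bounds (node.1 + (hi + 1) * vec.1, node.2 + (hi + 1) * vec.2) rows cols = false) :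
    ∀ (fuel : Nat) (i : Int) (acc : List (Int × Int)), 1 ≤ i → i ≤ hi + 1 →
      (hi + 1 - i).toNat < fuel →
      antinodesLoop node rows cols vec true i acc fuel
        = acc.reverse ++ (PySem.List.pyRange i (hi + 1) 1).map
            (fun j => (node.1 + j * vec.1, node.2 + j * vec.2)) := by
  intro fuel
  induction fuel with
  | zero => intro i acc _ _ h3; omega
  | succ fuel ih =>
    intro i acc hi1 hi2 hfuel
    by_cases hie : i = hi + 1
    · subst hie
      simp [antinodesLoop, hS, PySem.List.pyRange_one_eq_nil (le_refl (hi + 1))]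
    · have hile : i ≤ hi := by omega
      have hT := hP i hi1 hile
      simp only [antinodesLoop, hT, Bool.true_eq_false, if_false]
      rw [ih (i + 1) ((node.1 + i * vec.1, node.2 + i * vec.2) :: acc) (by omega) (by omega) (by omega)]
      rw [PySem.List.pyRange_one_cons (show i < hi + 1 by omega), List.map_cons]
      simp

-- A's whole loop under the hypotheses B's closed form grants
lemma a_run (node : Int × Int) (rows cols : Int) (vec : Int × Int) (hi : Int)
    (hi1 : 1 ≤ hi) (hile : hi ≤ rows ∨ hi ≤ cols) (hrows : 1 ≤ rows) (hcols : 1 ≤ cols)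
    (hP : ∀ j, 1 ≤ j → j ≤ hi →
      0 ≤ node.1 + j * vec.1 ∧ node.1 + j * vec.1 < rows ∧
      0 ≤ node.2 + j * vec.2 ∧ node.2 + j * vec.2 < cols)
    (hS : ¬ (0 ≤ node.1 + (hi + 1) * vec.1 ∧ node.1 + (hi + 1) * vec.1 < rows ∧
             0 ≤ node.2 + (hi + 1) * vec.2 ∧ node.2 + (hi + 1) * vec.2 < cols)) :
    antinodes_from node rows cols vec true
      = (PySem.List.pyRange 1 (hi + 1) 1).map
          (fun j => (node.1 + j * vec.1, node.2 + j * vec.2)) := by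
  unfold antinodes_from
  have := loop_run node rows cols vec hi
    (fun j hj1 hj2 => by simp only [within_bounds, decide_eq_true_eq]; exact hP j hj1 hj2)
    (by simp only [within_bounds, decide_eq_false_iff_not]; exact hS)
    (rows.toNat + cols.toNat + 2) 1 [] (by omega) (by omega) (by rcases hile with h | h <;> omega)
  simpa using this

-- the infinite=True in-bounds case: A's loop equals B's closed form
lemma hiAxis_isSome (p v bound : Int) (hv : v ≠ 0) : ∃ h, hiAxis p v bound = some h := by
  unfold hiAxis
  split_ifs with a b
  · exact ⟨_, rfl⟩
  · exact ⟨_, rfl⟩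
  · omega

lemma hiAxis_zero (p bound : Int) : hiAxis p 0 bound = none := by
  simp [hiAxis]

lemma inf_eq (node : Int × Int) (rows cols : Int) (vec : Int × Int)
    (hvec : ¬ (vec.1 = 0 ∧ vec.2 = 0))
    (h1 : 0 ≤ node.1 + vec.1) (h2 : node.1 + vec.1 < rows)
    (h3 : 0 ≤ node.2 + vec.2) (h4 : node.2 + vec.2 < cols) :
    antinodes_from node rows cols vec true = antinodes_from_alt node rows cols vec true := by
  have hrows : 1 ≤ rows := by linarith
  have hcols : 1 ≤ cols := by linarith
  by_cases hvx : vec.1 = 0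
  · have hvy : vec.2 ≠ 0 := fun h => hvec ⟨hvx, h⟩
    obtain ⟨hy, hhy⟩ := hiAxis_isSome node.2 vec.2 cols hvy
    have h1' : 0 ≤ node.1 := by omega
    have h2' : node.1 < rows := by omega
    have hB : antinodes_from_alt node rows cols vec true
        = (PySem.List.pyRange 1 (hy + 1) 1).map
            (fun j => (node.1 + j * vec.1, node.2 + j * vec.2)) := by
      simp [antinodes_from_alt, h1', h2', h3, h4, hvx, hiAxis_zero, hhy, PySem.List.min?_id_cons]
    rw [hB]
    refine a_run node rows cols vec hy (axis_one_le _ _ _ _ h3 h4 hhy)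
      (Or.inr (axis_le_bound _ _ _ _ h3 h4 hhy)) hrows hcols ?_ ?_
    · intro j hj1 hj2
      obtain ⟨a, b⟩ := axis_valid _ _ _ _ _ h3 h4 hhy hj1 hj2
      exact ⟨by rw [hvx, mul_zero]; linarith, by rw [hvx, mul_zero]; linarith, a, b⟩
    · rintro ⟨-, -, a, b⟩
      exact axis_stop _ _ _ _ _ hhy (by omega) ⟨a, b⟩
  · by_cases hvy : vec.2 = 0
    · obtain ⟨hx, hhx⟩ := hiAxis_isSome node.1 vec.1 rows hvx
      have h3' : 0 ≤ node.2 := by omega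
      have h4' : node.2 < cols := by omega
      have hB : antinodes_from_alt node rows cols vec true
          = (PySem.List.pyRange 1 (hx + 1) 1).map
              (fun j => (node.1 + j * vec.1, node.2 + j * vec.2)) := by
        simp [antinodes_from_alt, h1, h2, h3', h4', hvy, hiAxis_zero, hhx, PySem.List.min?_id_cons]
      rw [hB]
      refine a_run node rows cols vec hx (axis_one_le _ _ _ _ h1 h2 hhx)
        (Or.inl (axis_le_bound _ _ _ _ h1 h2 hhx)) hrows hcols ?_ ?_
      · intro j hj1 hj2
        obtain ⟨a, b⟩ := axis_valid _ _ _ _ _ h1 h2 hhx hj1 hj2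
        exact ⟨a, b, by rw [hvy, mul_zero]; linarith, by rw [hvy, mul_zero]; linarith⟩
      · rintro ⟨a, b, -, -⟩
        exact axis_stop _ _ _ _ _ hhx (by omega) ⟨a, b⟩
    · obtain ⟨hx, hhx⟩ := hiAxis_isSome node.1 vec.1 rows hvx
      obtain ⟨hy, hhy⟩ := hiAxis_isSome node.2 vec.2 cols hvy
      have hB : antinodes_from_alt node rows cols vec true
          = (PySem.List.pyRange 1 (min hx hy + 1) 1).map
              (fun j => (node.1 + j * vec.1, node.2 + j * vec.2)) := by
        simp [antinodes_from_alt, h1, h2, h3, h4, hhx, hhy, PySem.List.min?_id_cons]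
      rw [hB]
      refine a_run node rows cols vec (min hx hy)
        (le_min (axis_one_le _ _ _ _ h1 h2 hhx) (axis_one_le _ _ _ _ h3 h4 hhy))
        (Or.inl (le_trans (min_le_left _ _) (axis_le_bound _ _ _ _ h1 h2 hhx))) hrows hcols ?_ ?_
      · intro j hj1 hj2
        obtain ⟨a, b⟩ := axis_valid _ _ _ _ _ h1 h2 hhx hj1 (le_trans hj2 (min_le_left _ _))
        obtain ⟨c, d⟩ := axis_valid _ _ _ _ _ h3 h4 hhy hj1 (le_trans hj2 (min_le_right _ _))
        exact ⟨a, b, c, d⟩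
      · by_cases hxy : hx ≤ hy
        · rintro ⟨a, b, -, -⟩
          exact axis_stop _ _ _ _ _ hhx (by omega) ⟨a, b⟩
        · rintro ⟨-, -, c, d⟩
          exact axis_stop _ _ _ _ _ hhy (by omega) ⟨c, d⟩

-- ===== VERDICT (by name: the statement is the Claim_ definition above) =====
theorem antinodes_from_spec : Claim_equal_antinodes_from := by
  intro node rows cols vec infinite _ hPre
  unfold Spec_antinodes_from
  by_cases hP1 : 0 ≤ node.1 + vec.1 ∧ node.1 + vec.1 < rows ∧
      0 ≤ node.2 + vec.2 ∧ node.2 + vec.2 < cols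
  · obtain ⟨h1, h2, h3, h4⟩ := hP1
    cases infinite with
    | false =>
      have hf : rows.toNat + cols.toNat + 2 = (rows.toNat + cols.toNat + 1) + 1 := rfl
      unfold antinodes_from
      rw [hf, antinodesLoop]
      simp [within_bounds, antinodes_from_alt, h1, h2, h3, h4]
    | true =>
      have hvec : ¬ (vec.1 = 0 ∧ vec.2 = 0) := by
        rintro ⟨a, b⟩
        exact hPre ⟨rfl, a, b, by rw [a] at h1 h2; simpa using h1,
          by rw [a] at h1 h2; simpa using h2,
          by rw [b] at h3 h4; simpa using h3,
          by rw [b] at h3 h4; simpa using h4⟩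
      exact inf_eq node rows cols vec hvec h1 h2 h3 h4
  · have hf : rows.toNat + cols.toNat + 2 = (rows.toNat + cols.toNat + 1) + 1 := rfl
    unfold antinodes_from
    rw [hf, antinodesLoop]
    simp only [within_bounds, one_mul]
    rw [if_pos (by simp; omega)]
    simp [antinodes_from_alt, hP1]
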